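-- pv_equiv track=rewrite | github.com/TStalnaker44/hugging_face_analysis_replication | scripts/analysis/get_license_changes.py | getLicenseDeltas
-- ===== SOURCE A (Python) =====
-- def collapseOther(lic_list):
--     licenses = set()
--     for lic in lic_list:
--         if lic.endswith("(other)"):
--             licenses.add("other")
--         else:
--             licenses.add(lic)
--     return list(licenses)
--
-- def getLicenseDeltas(chain):
--     deltas = []
--     prev_link = chain[0]
--     for link in chain[1:]:
--         prev_lic = " | ".join(sorted(collapseOther(prev_link["license"])))
--         curr_lic = " | ".join(sorted(collapseOther(link["license"])))
--         if prev_lic != curr_lic: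
--             deltas.append((prev_lic, curr_lic))
--         prev_link = link
--     return deltas
-- ===== SOURCE B (Python) =====
-- def collapseOther(lic_list):
--     licenses = set()
--     for lic in lic_list:
--         if lic.endswith("(other)"):
--             licenses.add("other")
--         else:
--             licenses.add(lic)
--     return list(licenses)
--
-- def getLicenseDeltas(chain):
--     # Run-length collapse: walk the chain once, keeping only the runs of
--     # equal consecutive normalised license strings; every adjacent pair of
--     # runs is then a delta by construction (no comparison/filter pass needed).
--     runs = []
--     for link in chain:
--         key = " | ".join(sorted(collapseOther(link.get("license", []))))
--         if not runs or runs[-1] != key: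
--             runs.append(key)
--     return list(zip(runs, runs[1:]))
-- ===== Notes on version B (the rewrite author's own statement) =====
-- stated objective: alternative
-- what changed: A threads a prev_link through the loop and compares/filters each adjacent pair of normalised license strings; B instead collapses the chain into runs of equal consecutive normalised strings (reading each link's licenses once with .get) and returns all adjacent pairs of that run list, where every pair is a delta by construction.
import Mathlib
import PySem

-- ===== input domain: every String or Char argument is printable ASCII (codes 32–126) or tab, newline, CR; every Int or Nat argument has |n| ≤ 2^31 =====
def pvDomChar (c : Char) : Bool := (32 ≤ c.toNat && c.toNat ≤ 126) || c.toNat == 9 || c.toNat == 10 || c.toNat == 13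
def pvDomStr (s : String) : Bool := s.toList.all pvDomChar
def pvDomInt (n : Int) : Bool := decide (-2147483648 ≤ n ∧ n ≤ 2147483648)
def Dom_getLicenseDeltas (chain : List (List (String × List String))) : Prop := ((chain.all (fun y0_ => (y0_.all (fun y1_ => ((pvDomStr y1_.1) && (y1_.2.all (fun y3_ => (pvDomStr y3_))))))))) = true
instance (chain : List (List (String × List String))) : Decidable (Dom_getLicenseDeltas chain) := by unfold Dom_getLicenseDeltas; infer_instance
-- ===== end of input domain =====

-- B replaces A's prev_link-and-compare loop by a run-length collapse of the
-- normalised license strings followed by pairing adjacent runs; same results,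
-- no speed claim.

-- ===== PORT A =====
-- shared helper collapseOther (identical in Source A and Source B)
def collapseOther (licList : List String) : List String :=
  licList.foldl
    (fun s lic =>
      if PySem.Str.endswith lic "(other)" then PySem.Set.add s "other" else PySem.Set.add s lic)
    PySem.Set.empty

-- the normalised license string " | ".join(sorted(collapseOther(link["license"])))
-- (computed inline by both Source A and Source B)
def pvKey (link : List (String × List String)) : String :=
  PySem.Str.join " | "
    (PySem.List.sorted (collapseOther ((PySem.Dict.mk link).getD "license" [])) (fun x => x) false)

def getLicenseDeltas (chain : List (List (String × List String))) : List (String × String) :=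
  match chain with
  | [] => []   -- Python: chain[0] raises IndexError here; excluded by Pre_
  | first :: rest =>
    (rest.foldl
      (fun (st : List (String × String) × List (String × List String)) link =>
        let prevLic := pvKey st.2
        let currLic := pvKey link
        (if prevLic ≠ currLic then st.1 ++ [(prevLic, currLic)] else st.1, link))
      ([], first)).1

-- ===== PORT B =====
def getLicenseDeltas_alt (chain : List (List (String × List String))) : List (String × String) :=
  let runs := chain.foldl
    (fun (runs : List String) link =>
      let key := pvKey link
      if runs.isEmpty || runs.getLast? != some key then runs ++ [key] else runs)
    []
  runs.zip runs.tail

-- ===== PRECONDITION & SPEC =====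
-- Pre_ excludes exactly the inputs where A raises: the empty chain (IndexError at
-- chain[0]) and chains of two or more links in which some link lacks a "license"
-- key (KeyError).
def Pre_getLicenseDeltas (chain : List (List (String × List String))) : Prop :=
  chain ≠ [] ∧ (chain.tail = [] ∨ ∀ link ∈ chain, ((PySem.Dict.mk link).contains "license") = true)
instance (chain : List (List (String × List String))) : Decidable (Pre_getLicenseDeltas chain) := by
  unfold Pre_getLicenseDeltas; infer_instance

def pvWitness_getLicenseDeltas : (List (List (String × List String))) :=
  [[("license", ["mit", "x(other)"])], [("license", ["mit"])]]

def Spec_getLicenseDeltas (chain : List (List (String × List String))) (out : List (String × String)) : Prop := out = getLicenseDeltas_alt chain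
instance (chain : List (List (String × List String))) (out : List (String × String)) : Decidable (Spec_getLicenseDeltas chain out) := by unfold Spec_getLicenseDeltas; infer_instance

-- ===== CLAIM (what is proved, stated in full; the proofs are below) =====
def Claim_equal_getLicenseDeltas : Prop := ∀ (chain : List (List (String × List String))), Dom_getLicenseDeltas chain → Pre_getLicenseDeltas chain → Spec_getLicenseDeltas chain (getLicenseDeltas chain)

-- ===== LEMMAS AND PROOFS =====

-- The differing adjacent pairs of keys, starting after key p.
def deltasK (p : String) : List String → List (String × String)
  | [] => []
  | k :: ks => (if p ≠ k then [(p, k)] else []) ++ deltasK k ks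

-- The runs after an initial run ending in p.
def tailRuns (p : String) : List String → List String
  | [] => []
  | k :: ks => if p = k then tailRuns p ks else k :: tailRuns k ks

-- A's loop produces the accumulated deltas followed by deltasK of the keys.
lemma loopA_eq (rest : List (List (String × List String))) :
    ∀ (first : List (String × List String)) (acc : List (String × String)),
    (rest.foldl
      (fun (st : List (String × String) × List (String × List String)) link =>
        (if pvKey st.2 ≠ pvKey link then st.1 ++ [(pvKey st.2, pvKey link)] else st.1, link))
      (acc, first)).1
    = acc ++ deltasK (pvKey first) (rest.map pvKey) := by
  induction rest with
  | nil => intro first acc; simp [deltasK]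
  | cons link rest' ih =>
    intro first acc
    simp only [List.foldl_cons, List.map_cons, deltasK]
    rw [ih]
    by_cases h : pvKey first = pvKey link
    · simp [h]
    · simp [h]

-- B's fold, started from a nonempty run list ending in p, appends tailRuns of the keys.
lemma loopB_eq (links : List (List (String × List String))) :
    ∀ (rs : List String) (p : String), rs ≠ [] → rs.getLast? = some p →
    links.foldl
      (fun (runs : List String) link =>
        if runs.isEmpty || runs.getLast? != some (pvKey link) then runs ++ [pvKey link] else runs)
      rs
    = rs ++ tailRuns p (links.map pvKey) := by
  induction links with
  | nil => intro rs p _ _; simp [tailRuns]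
  | cons link links' ih =>
    intro rs p hne hlast
    simp only [List.foldl_cons, List.map_cons, tailRuns]
    by_cases h : p = pvKey link
    · have : (rs.isEmpty || rs.getLast? != some (pvKey link)) = false := by
        subst h; simp [hlast, hne]
      rw [this]
      simp only [Bool.false_eq_true, if_false]
      rw [ih rs p hne hlast, if_pos h]
    · have : (rs.isEmpty || rs.getLast? != some (pvKey link)) = true := by
        simp [hlast, h]
      rw [this]
      simp only [if_true]
      rw [ih (rs ++ [pvKey link]) (pvKey link) (by simp) (by simp)]
      simp [h]

-- Adjacent pairs of (p :: tailRuns p ks) are exactly deltasK p ks.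
lemma zip_tailRuns (ks : List String) :
    ∀ (p : String), ((p :: tailRuns p ks).zip (tailRuns p ks)) = deltasK p ks := by
  induction ks with
  | nil => intro p; simp [tailRuns, deltasK]
  | cons k ks' ih =>
    intro p
    by_cases h : p = k
    · simp [tailRuns, deltasK, h, ih]
    · simp only [tailRuns, deltasK, if_neg h]
      have := ih k
      simp only [List.zip] at this ⊢
      simp [h, this]

-- ===== VERDICT (by name: the statement is the Claim_ definition above) =====
theorem getLicenseDeltas_spec : Claim_equal_getLicenseDeltas := by
  intro chain _ hpre
  unfold Spec_getLicenseDeltas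
  match chain with
  | [] => exact absurd rfl hpre.1
  | first :: rest =>
    have hA : getLicenseDeltas (first :: rest) = (rest.foldl
      (fun (st : List (String × String) × List (String × List String)) link =>
        (if pvKey st.2 ≠ pvKey link then st.1 ++ [(pvKey st.2, pvKey link)] else st.1, link))
      ([], first)).1 := rfl
    have hB : getLicenseDeltas_alt (first :: rest)
        = (([pvKey first] ++ tailRuns (pvKey first) (rest.map pvKey)).zip
           (([pvKey first] ++ tailRuns (pvKey first) (rest.map pvKey)).tail)) := by
      show ((first :: rest).foldl
        (fun (runs : List String) link =>
          if runs.isEmpty || runs.getLast? != some (pvKey link) then runs ++ [pvKey link] else runs)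
        []).zip _ = _
      rw [List.foldl_cons, show (List.foldl _ (if ([] : List String).isEmpty || ([] : List String).getLast? != some (pvKey first) then [] ++ [pvKey first] else []) rest) = List.foldl (fun (runs : List String) link => if runs.isEmpty || runs.getLast? != some (pvKey link) then runs ++ [pvKey link] else runs) [pvKey first] rest from rfl]
      rw [loopB_eq rest [pvKey first] (pvKey first) (by simp) (by simp)]
    rw [hA, loopA_eq rest first [], hB]
    simp only [List.singleton_append, List.tail_cons]
    exact (zip_tailRuns (rest.map pvKey) (pvKey first)).symm
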